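-- pv_equiv track=rewrite | github.com/nicole-drinda-max/robust-telemetry-codec- | robust_telemetry_codec.py | fib_decode_stream
-- ===== SOURCE A (Python) =====
-- from typing import List, Tuple, Optional
--
-- def fib_decode_stream(bitstream: str, max_items: Optional[int] = None) -> List[int]:
--     """Decode concatenated Fibonacci-coded integers from a bitstream."""
--     out = []
--     i = 0
--
--     while i < len(bitstream):
--         if max_items is not None and len(out) >= max_items:
--             break
--
--         # Read until we hit the '11' pattern that terminates a codeword
--         code_bits = []
--         prev = "0"
--         while i < len(bitstream):
--             b = bitstream[i]
--             code_bits.append(b)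
--             i += 1
--             if prev == "1" and b == "1":
--                 break
--             prev = b
--
--         if len(code_bits) < 2 or not (code_bits[-2] == "1" and code_bits[-1] == "1"):
--             raise ValueError("Invalid/incomplete Fibonacci codeword at end of stream.")
--
--         # Drop final terminator '1'
--         rep = code_bits[:-1]
--
--         # Map rep bits to descending fibs of same length
--         fibs = [1, 2]
--         while len(fibs) < len(rep):
--             fibs.append(fibs[-1] + fibs[-2])
--         fibs = list(reversed(fibs[:len(rep)]))
--
--         val = 0
--         for bit, f in zip(rep, fibs):
--             if bit == "1":
--                 val += f
--         out.append(val)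
--
--     return out
-- ===== SOURCE B (Python) =====
-- from typing import List, Optional
--
-- def fib_decode_stream(bitstream: str, max_items: Optional[int] = None) -> List[int]:
--     """Decode concatenated Fibonacci-coded integers: tokenize first, then decode."""
--     # Pass 1: split the stream into complete codewords at each '11' terminator.
--     tokens = []
--     cur = []
--     prev = "0"
--     for b in bitstream:
--         cur.append(b)
--         if prev == "1" and b == "1":
--             tokens.append(cur)
--             cur = []
--             prev = "0"
--         else:
--             prev = b
--     if max_items is None:
--         limit = len(tokens)
--     else:
--         limit = max(0, min(max_items, len(tokens)))
--     if cur and (max_items is None or len(tokens) < max_items):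
--         raise ValueError("Invalid/incomplete Fibonacci codeword at end of stream.")
--     # Pass 2: decode each codeword right-to-left with a running Fibonacci pair.
--     result = []
--     for tok in tokens[:limit]:
--         a, fb = 1, 2
--         val = 0
--         for bit in reversed(tok[:-1]):
--             if bit == "1":
--                 val += a
--             a, fb = fb, a + fb
--         result.append(val)
--     return result
-- ===== Notes on version B (the rewrite author's own statement) =====
-- stated objective: alternative
-- what changed: B tokenizes the whole stream into terminator-delimited codewords in one pass and then decodes each codeword right-to-left with a running Fibonacci pair (a,b), instead of A's interleaved read-loop that builds an explicit descending fib list per codeword and sums a zip; Pre_ excludes exactly the inputs on which both programs raise ValueError (an incomplete trailing codeword that decoding actually reaches).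
import Mathlib
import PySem

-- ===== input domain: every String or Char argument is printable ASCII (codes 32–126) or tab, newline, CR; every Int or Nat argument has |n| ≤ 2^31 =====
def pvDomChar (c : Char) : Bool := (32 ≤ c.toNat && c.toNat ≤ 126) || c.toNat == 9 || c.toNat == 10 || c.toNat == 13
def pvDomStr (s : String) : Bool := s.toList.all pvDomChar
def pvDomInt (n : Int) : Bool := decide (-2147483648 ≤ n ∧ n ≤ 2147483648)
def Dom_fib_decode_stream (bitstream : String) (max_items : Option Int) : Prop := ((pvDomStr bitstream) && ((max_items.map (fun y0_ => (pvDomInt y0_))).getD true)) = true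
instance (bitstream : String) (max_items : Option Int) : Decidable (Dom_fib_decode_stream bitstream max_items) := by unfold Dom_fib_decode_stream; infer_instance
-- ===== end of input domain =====

-- B tokenizes the stream into '11'-terminated codewords in one pass, then decodes each
-- codeword right-to-left with a running Fibonacci pair, replacing A's interleaved
-- read-loop + per-codeword descending fib list (alternative decomposition, same cost).


-- ===== PORT A =====

-- A's inner while loop: read chars until a '1','1' pair; returns (code_bits, rest of stream)
def pvReadCode : List Char → Char → List Char × List Char
  | [], _ => ([], [])
  | b :: rest, prev =>
    if prev = '1' ∧ b = '1' then ([b], rest)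
    else
      let p := pvReadCode rest b
      (b :: p.1, p.2)

theorem pvReadCode_len (cs : List Char) (prev : Char) :
    (pvReadCode cs prev).2.length ≤ cs.length := by
  induction cs generalizing prev with
  | nil => simp [pvReadCode]
  | cons b rest ih =>
    simp only [pvReadCode]
    split
    · simp
    · simpa using Nat.le_succ_of_le (ih b)

theorem pvReadCode_len_cons (b : Char) (rest : List Char) (prev : Char) :
    (pvReadCode (b :: rest) prev).2.length ≤ rest.length := by
  simp only [pvReadCode]
  split
  · simp
  · simpa using pvReadCode_len rest b

-- A's `while len(fibs) < len(rep): fibs.append(fibs[-1] + fibs[-2])`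
def pvBuildFibs (fibs : List Int) (n : Nat) : List Int :=
  if fibs.length < n then
    pvBuildFibs (fibs ++ [fibs.getD (fibs.length - 1) 0 + fibs.getD (fibs.length - 2) 0]) n
  else fibs
termination_by n - fibs.length
decreasing_by simp; omega

-- A's outer while loop
def pvOuterA (cs : List Char) (out : List Int) (max_items : Option Int) : List Int :=
  match cs with
  | [] => out
  | b :: rest =>
    if (match max_items with | some m => decide (m ≤ (out.length : Int)) | none => false) then out
    else
      let p := pvReadCode (b :: rest) '0'
      let code := p.1
      if code.length < 2 ∨ ¬(code.getD (code.length - 2) ' ' = '1' ∧ code.getD (code.length - 1) ' ' = '1') then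
        out  -- Python raises ValueError here; excluded by Pre_
      else
        let rep := code.dropLast
        let fibs := ((pvBuildFibs [1, 2] rep.length).take rep.length).reverse
        let val := (rep.zip fibs).foldl (fun v q => if q.1 = '1' then v + q.2 else v) 0
        pvOuterA p.2 (out ++ [val]) max_items
termination_by cs.length
decreasing_by
  exact Nat.lt_succ_of_le (pvReadCode_len_cons _ _ '0')

def fib_decode_stream (bitstream : String) (max_items : Option Int) : List Int :=
  pvOuterA bitstream.toList [] max_items

-- ===== PORT B =====

-- B's pass 1: split into '11'-terminated tokens; returns (tokens, unfinished cur)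
def pvTokenize : List Char → List Char → Char → List (List Char) → List (List Char) × List Char
  | [], cur, _, toks => (toks, cur)
  | b :: rest, cur, prev, toks =>
    if prev = '1' ∧ b = '1' then pvTokenize rest [] '0' (toks ++ [cur ++ [b]])
    else pvTokenize rest (cur ++ [b]) b toks

-- B's inner decode loop over reversed(tok[:-1]) with running pair (a, fb)
def pvDecodeB : List Char → Int → Int → Int → Int
  | [], _, _, v => v
  | b :: rest, a, fb, v => pvDecodeB rest fb (a + fb) (if b = '1' then v + a else v)

def fib_decode_stream_alt (bitstream : String) (max_items : Option Int) : List Int :=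
  let p := pvTokenize bitstream.toList [] '0' []
  let toks := p.1
  let limit : Nat := match max_items with
    | none => toks.length
    | some m => (min m (toks.length : Int)).toNat
  (toks.take limit).map (fun tok => pvDecodeB tok.dropLast.reverse 1 2 0)

-- ===== PRECONDITION & SPEC =====

-- One left-to-right scan counting complete '11'-terminated codewords and whether an
-- unfinished tail remains; used only to state where the Python programs raise.
def pvScan : List Char → Char → Bool → Nat × Bool
  | [], _, curNE => (0, curNE)
  | b :: rest, prev, _ =>
    if prev = '1' ∧ b = '1' then
      let p := pvScan rest '0' false
      (p.1 + 1, p.2)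
    else pvScan rest b true

-- Pre_ excludes exactly the inputs where Python A (and B) raise ValueError: a non-empty
-- incomplete trailing codeword that decoding actually reaches (max_items does not stop first).
def Pre_fib_decode_stream (bitstream : String) (max_items : Option Int) : Prop :=
  (pvScan bitstream.toList '0' false).2 = false ∨
  (match max_items with
   | none => False
   | some m => m ≤ ((pvScan bitstream.toList '0' false).1 : Int))

instance (bitstream : String) (max_items : Option Int) : Decidable (Pre_fib_decode_stream bitstream max_items) := by
  unfold Pre_fib_decode_stream
  rcases max_items with _ | m <;> infer_instance

def pvWitness_fib_decode_stream : String × Option Int := ("11011", some 1)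

def Spec_fib_decode_stream (bitstream : String) (max_items : Option Int) (out : List Int) : Prop := out = fib_decode_stream_alt bitstream max_items
instance (bitstream : String) (max_items : Option Int) (out : List Int) : Decidable (Spec_fib_decode_stream bitstream max_items out) := by unfold Spec_fib_decode_stream; infer_instance

-- ===== CLAIM (what is proved, stated in full; the proofs are below) =====
def Claim_equal_fib_decode_stream : Prop := ∀ (bitstream : String) (max_items : Option Int), Dom_fib_decode_stream bitstream max_items → Pre_fib_decode_stream bitstream max_items → Spec_fib_decode_stream bitstream max_items (fib_decode_stream bitstream max_items)

-- ===== LEMMAS AND PROOFS =====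

-- Does the stream (scanned from state prev) contain a codeword terminator?
def pvHasTerm : List Char → Char → Bool
  | [], _ => false
  | b :: rest, prev => if prev = '1' ∧ b = '1' then true else pvHasTerm rest b

-- Fibonacci weights as used by A (1, 2, 3, 5, ...)
def pvFibW : Nat → Int
  | 0 => 1
  | 1 => 2
  | n + 2 => pvFibW (n + 1) + pvFibW n

def pvFibList (m : Nat) : List Int := (List.range m).map pvFibW

def pvWval : List Char → Nat → Int
  | [], _ => 0
  | b :: r, k => (if b = '1' then pvFibW k else 0) + pvWval r (k + 1)

def pvPairSum : List Char → List Int → Int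
  | [], _ => 0
  | _ :: _, [] => 0
  | b :: r, w :: ws => (if b = '1' then w else 0) + pvPairSum r ws

theorem pvTokenize_acc (cs : List Char) : ∀ (cur : List Char) (prev : Char) (toks : List (List Char)),
    pvTokenize cs cur prev toks =
      (toks ++ (pvTokenize cs cur prev []).1, (pvTokenize cs cur prev []).2) := by
  induction cs with
  | nil => intro cur prev toks; simp [pvTokenize]
  | cons b rest ih =>
    intro cur prev toks
    simp only [pvTokenize]
    split
    · rw [ih [] '0' (toks ++ [cur ++ [b]]), ih [] '0' ([] ++ [cur ++ [b]])]
      simp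
    · rw [ih (cur ++ [b]) b toks, ih (cur ++ [b]) b []]

theorem pvSplit_true (cs : List Char) : ∀ (prev : Char), pvHasTerm cs prev = true →
    ((prev = '1' ∧ (pvReadCode cs prev).1 = ['1']) ∨ ∃ body, (pvReadCode cs prev).1 = body ++ ['1', '1'])
    ∧ (∀ cur toks, pvTokenize cs cur prev toks =
        pvTokenize (pvReadCode cs prev).2 [] '0' (toks ++ [cur ++ (pvReadCode cs prev).1]))
    ∧ (∀ c, pvScan cs prev c =
        ((pvScan (pvReadCode cs prev).2 '0' false).1 + 1, (pvScan (pvReadCode cs prev).2 '0' false).2)) := by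
  induction cs with
  | nil => intro prev h; simp [pvHasTerm] at h
  | cons b rest ih =>
    intro prev h
    simp only [pvHasTerm] at h
    by_cases hg : prev = '1' ∧ b = '1'
    · refine ⟨?_, ?_, ?_⟩
      · left
        simp only [pvReadCode, if_pos hg]
        exact ⟨hg.1, by rw [hg.2]⟩
      · intro cur toks
        simp only [pvTokenize, pvReadCode, if_pos hg]
      · intro c
        simp only [pvScan, pvReadCode, if_pos hg]
    · rw [if_neg hg] at h
      obtain ⟨h1, h2, h3⟩ := ih b h
      refine ⟨?_, ?_, ?_⟩
      · right
        simp only [pvReadCode, if_neg hg]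
        rcases h1 with ⟨hb, hc⟩ | ⟨body, hc⟩
        · exact ⟨[], by subst hb; simp [hc]⟩
        · exact ⟨b :: body, by simp [hc]⟩
      · intro cur toks
        simp only [pvTokenize, pvReadCode, if_neg hg]
        rw [h2 (cur ++ [b]) toks]
        simp
      · intro c
        simp only [pvScan, pvReadCode, if_neg hg]
        exact h3 true

theorem pvSplit_false (cs : List Char) : ∀ (prev : Char), pvHasTerm cs prev = false →
    pvReadCode cs prev = (cs, []) ∧
    (∀ cur toks, pvTokenize cs cur prev toks = (toks, cur ++ cs)) ∧
    (∀ c, pvScan cs prev c = (0, if cs = [] then c else true)) := by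
  induction cs with
  | nil =>
    intro prev _
    refine ⟨rfl, fun cur toks => by simp [pvTokenize], fun c => by simp [pvScan]⟩
  | cons b rest ih =>
    intro prev h
    simp only [pvHasTerm] at h
    split at h
    · exact absurd h (by simp)
    · rename_i hg
      obtain ⟨h1, h2, h3⟩ := ih b h
      refine ⟨?_, ?_, ?_⟩
      · simp only [pvReadCode]
        rw [if_neg hg, h1]
      · intro cur toks
        simp only [pvTokenize]
        rw [if_neg hg, h2 (cur ++ [b]) toks]
        simp
      · intro c
        simp only [pvScan]
        rw [if_neg hg, h3 true]
        split <;> simp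

theorem pvBuildFibs_eq (k : Nat) : ∀ (m n : Nat), 2 ≤ m → n ≤ m + k →
    pvBuildFibs (pvFibList m) n = pvFibList (max m n) := by
  induction k with
  | zero =>
    intro m n hm hn
    rw [pvBuildFibs, show (pvFibList m).length = m from by simp [pvFibList], if_neg (by omega)]
    congr 1
    omega
  | succ k ihk =>
    intro m n hm hn
    rw [pvBuildFibs, show (pvFibList m).length = m from by simp [pvFibList]]
    by_cases hlt : m < n
    · rw [if_pos hlt]
      have hg1 : (pvFibList m).getD (m - 1) 0 = pvFibW (m - 1) := by
        simp [pvFibList, List.getD_eq_getElem?_getD, show m - 1 < m from by omega]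
      have hg2 : (pvFibList m).getD (m - 2) 0 = pvFibW (m - 2) := by
        simp [pvFibList, List.getD_eq_getElem?_getD, show m - 2 < m from by omega]
      have hsum : pvFibW (m - 1) + pvFibW (m - 2) = pvFibW m := by
        conv_rhs => rw [show m = m - 2 + 2 from by omega]
        rw [pvFibW, show m - 2 + 1 = m - 1 from by omega]
      have happ : pvFibList m ++ [pvFibW m] = pvFibList (m + 1) := by
        simp [pvFibList, List.range_succ]
      rw [hg1, hg2, hsum, happ, ihk (m + 1) n (by omega) (by omega)]
      congr 1
      omega
    · rw [if_neg hlt]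
      congr 1
      omega

theorem pvZipFoldl (rep : List Char) : ∀ (ws : List Int) (v : Int),
    (rep.zip ws).foldl (fun v q => if q.1 = '1' then v + q.2 else v) v = v + pvPairSum rep ws := by
  induction rep with
  | nil => intro ws v; simp [pvPairSum]
  | cons b r ih =>
    intro ws v
    cases ws with
    | nil => simp [pvPairSum]
    | cons w ws =>
      simp only [List.zip_cons_cons, List.foldl_cons, pvPairSum, ih]
      split <;> ring

theorem pvWval_append (l : List Char) : ∀ (b : Char) (k : Nat),
    pvWval (l ++ [b]) k = pvWval l k + (if b = '1' then pvFibW (k + l.length) else 0) := by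
  induction l with
  | nil => intro b k; simp [pvWval]
  | cons c r ih =>
    intro b k
    simp only [List.cons_append, pvWval, ih, List.length_cons]
    have : k + 1 + r.length = k + (r.length + 1) := by omega
    rw [this]; ring

theorem pvPairSum_desc (rep : List Char) :
    pvPairSum rep (pvFibList rep.length).reverse = pvWval rep.reverse 0 := by
  induction rep with
  | nil => simp [pvPairSum, pvWval]
  | cons b r ih =>
    have hsplit : pvFibList (r.length + 1) = pvFibList r.length ++ [pvFibW r.length] := by
      simp [pvFibList, List.range_succ]
    simp only [List.length_cons, hsplit, List.reverse_append, List.reverse_cons, List.reverse_nil,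
      List.nil_append, List.singleton_append, pvPairSum, ih, List.reverse_cons]
    rw [pvWval_append]
    simp
    split <;> ring

theorem pvDecodeB_eq (bits : List Char) : ∀ (k : Nat) (v : Int),
    pvDecodeB bits (pvFibW k) (pvFibW (k + 1)) v = v + pvWval bits k := by
  induction bits with
  | nil => intro k v; simp [pvDecodeB, pvWval]
  | cons b r ih =>
    intro k v
    simp only [pvDecodeB, pvWval]
    have hf : pvFibW k + pvFibW (k + 1) = pvFibW (k + 2) := by
      simp [pvFibW]; ring
    rw [hf, ih (k + 1)]
    split <;> ring

theorem pvValA_eq (rep : List Char) :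
    (rep.zip (((pvBuildFibs [1, 2] rep.length).take rep.length).reverse)).foldl
      (fun v q => if q.1 = '1' then v + q.2 else v) 0 = pvDecodeB rep.reverse 1 2 0 := by
  have h12 : ([1, 2] : List Int) = pvFibList 2 := by
    simp [pvFibList, List.range_succ]
    exact ⟨rfl, rfl⟩
  have hb : pvBuildFibs [1, 2] rep.length = pvFibList (max 2 rep.length) := by
    rw [h12]; exact pvBuildFibs_eq rep.length 2 rep.length le_rfl (by omega)
  have ht : (pvFibList (max 2 rep.length)).take rep.length = pvFibList rep.length := by
    simp only [pvFibList, ← List.map_take, List.take_range]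
    congr 2
    omega
  rw [hb, ht, pvZipFoldl, pvPairSum_desc,
    show (1 : Int) = pvFibW 0 from rfl, show (2 : Int) = pvFibW 1 from rfl, pvDecodeB_eq]

-- getD facts about a codeword body ++ ['1','1']
theorem pvLast2 (body : List Char) :
    (body ++ ['1', '1']).getD ((body ++ ['1', '1']).length - 2) ' ' = '1' ∧
    (body ++ ['1', '1']).getD ((body ++ ['1', '1']).length - 1) ' ' = '1' := by
  have hlen : (body ++ ['1', '1']).length = body.length + 2 := by simp
  rw [hlen, show body.length + 2 - 2 = body.length from by omega,
    show body.length + 2 - 1 = body.length + 1 from by omega,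
    List.getD_append_right _ _ _ _ le_rfl,
    List.getD_append_right _ _ _ _ (by omega)]
  simp

def pvLimitF (mi : Option Int) (k : Nat) (len : Nat) : Nat :=
  match mi with
  | none => len
  | some m => (min (m - k) (len : Int)).toNat

theorem pvStep (N : Nat)
    (ihN : ∀ (cs : List Char), cs.length ≤ N → ∀ (mi : Option Int) (out : List Int),
      ((pvScan cs '0' false).2 = false ∨
        ∃ m, mi = some m ∧ m ≤ ((pvScan cs '0' false).1 : Int) + out.length) →
      pvOuterA cs out mi = out ++
        (((pvTokenize cs [] '0' []).1.take (pvLimitF mi out.length (pvTokenize cs [] '0' []).1.length)).map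
          (fun tok => pvDecodeB tok.dropLast.reverse 1 2 0)))
    (b : Char) (rest : List Char) (hlen : (b :: rest).length ≤ N + 1)
    (mi : Option Int) (out : List Int)
    (h : (pvScan (b :: rest) '0' false).2 = false ∨
      ∃ m, mi = some m ∧ m ≤ ((pvScan (b :: rest) '0' false).1 : Int) + out.length)
    (hstop : ∀ m, mi = some m → ¬ m ≤ (out.length : Int)) :
    pvOuterA (b :: rest) out mi = out ++
      (((pvTokenize (b :: rest) [] '0' []).1.take
          (pvLimitF mi out.length (pvTokenize (b :: rest) [] '0' []).1.length)).map
        (fun tok => pvDecodeB tok.dropLast.reverse 1 2 0)) := by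
  rw [pvOuterA.eq_def]
  dsimp only
  rw [if_neg (by
    rcases mi with _ | m
    · simp
    · simpa using hstop m rfl)]
  cases hterm : pvHasTerm (b :: rest) '0' with
  | false =>
    exfalso
    obtain ⟨_, _, hscan⟩ := pvSplit_false _ _ hterm
    rw [hscan false] at h
    rcases h with h | ⟨m, hm, hle⟩
    · simp at h
    · refine hstop m hm ?_
      simp at hle
      omega
  | true =>
    obtain ⟨hcode, htok, hscan⟩ := pvSplit_true _ _ hterm
    rcases hcode with ⟨hprev, _⟩ | ⟨body, hbody⟩
    · exact absurd hprev (by decide)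
    have hval := pvLast2 body
    rw [if_neg (by
      rw [not_or, not_lt, not_not]
      rw [hbody]
      exact ⟨by simp, hval.1, hval.2⟩)]
    rw [pvValA_eq]
    have hrest : (pvReadCode (b :: rest) '0').2.length ≤ N := by
      have := pvReadCode_len_cons b rest '0'
      simp at hlen
      omega
    rw [ihN (pvReadCode (b :: rest) '0').2 hrest mi
      (out ++ [pvDecodeB (pvReadCode (b :: rest) '0').1.dropLast.reverse 1 2 0]) ?_]
    · have htoks : (pvTokenize (b :: rest) [] '0' []).1 =
          (pvReadCode (b :: rest) '0').1 :: (pvTokenize (pvReadCode (b :: rest) '0').2 [] '0' []).1 := by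
        rw [htok [] [], pvTokenize_acc]
        simp
      rw [htoks]
      have hL : pvLimitF mi out.length
          ((pvReadCode (b :: rest) '0').1 :: (pvTokenize (pvReadCode (b :: rest) '0').2 [] '0' []).1).length =
          pvLimitF mi (out.length + 1) (pvTokenize (pvReadCode (b :: rest) '0').2 [] '0' []).1.length + 1 := by
        rcases mi with _ | m
        · simp [pvLimitF]
        · have hm := hstop m rfl
          simp only [pvLimitF, List.length_cons]
          push_cast
          omega
      rw [hL]
      simp
    · rw [hscan false] at h
      rcases h with h | ⟨m, hm, hle⟩
      · exact Or.inl h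
      · subst hm
        refine Or.inr ⟨m, rfl, ?_⟩
        simp at hle ⊢
        omega

theorem pvMain (N : Nat) : ∀ (cs : List Char), cs.length ≤ N → ∀ (mi : Option Int) (out : List Int),
    ((pvScan cs '0' false).2 = false ∨
      ∃ m, mi = some m ∧ m ≤ ((pvScan cs '0' false).1 : Int) + out.length) →
    pvOuterA cs out mi = out ++
      (((pvTokenize cs [] '0' []).1.take (pvLimitF mi out.length (pvTokenize cs [] '0' []).1.length)).map
        (fun tok => pvDecodeB tok.dropLast.reverse 1 2 0)) := by
  induction N with
  | zero =>
    intro cs hlen mi out h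
    have : cs = [] := by cases cs <;> simp_all
    subst this
    simp [pvOuterA, pvTokenize]
  | succ N ihN =>
    intro cs hlen mi out h
    cases cs with
    | nil => simp [pvOuterA, pvTokenize]
    | cons b rest =>
      rcases mi with _ | m
      · exact pvStep N ihN b rest hlen none out h (by simp)
      · by_cases hm : m ≤ (out.length : Int)
        · rw [pvOuterA.eq_def]
          dsimp only
          rw [if_pos (by simpa using hm)]
          have hL0 : pvLimitF (some m) out.length (pvTokenize (b :: rest) [] '0' []).1.length = 0 := by
            simp only [pvLimitF]
            omega
          rw [hL0]
          simp
        · exact pvStep N ihN b rest hlen (some m) out h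
            (by intro m' heq; cases heq; exact hm)

-- ===== VERDICT (by name: the statement is the Claim_ definition above) =====
theorem fib_decode_stream_spec : Claim_equal_fib_decode_stream := by
  intro bs mi _dom hpre
  unfold Spec_fib_decode_stream fib_decode_stream fib_decode_stream_alt
  rw [pvMain bs.toList.length bs.toList le_rfl mi []]
  · rcases mi with _ | m
    · rfl
    · simp [pvLimitF]
  · unfold Pre_fib_decode_stream at hpre
    rcases hpre with h | h
    · exact Or.inl h
    · rcases mi with _ | m
      · exact absurd h (by simp)
      · exact Or.inr ⟨m, rfl, by simpa using h⟩
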